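-- pv_equiv track=rewrite | github.com/BWSI-RACECAR/code-clash-10-omlola | songanalyzer.py | song_analyze
-- ===== SOURCE A (Python) =====
-- def song_analyze(lyric):
--     words = lyric.split(" ")
--     rhymes = []
--     rhyming = 0
--     seenletters = []
--     letternumber = []
--     for word in words:
--         if len(word) >= 3:
--             if word[len(word)-3:len(word)] in rhymes:
--                 rhyming+=1
--             else:
--                 rhymes.append(word[len(word)-3:len(word)])
--         if word[0] in seenletters:
--             letternumber[seenletters.index(word[0])]+=1
--         else:
--             seenletters.append(word[0])
--             letternumber.append(1)
--     retval = ""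
--     for ix, x in enumerate(seenletters):
--         if(letternumber[ix]) > 1:
--             retval+=(x+"="+str(letternumber[ix])+", ")
--     return retval + str(rhyming) + " rhyming words"
-- ===== SOURCE B (Python) =====
-- def song_analyze(lyric):
--     words = lyric.split(" ")
--     sufs = sorted(w[-3:] for w in words if len(w) >= 3)
--     rhyming = sum(1 for a, b in zip(sufs, sufs[1:]) if a == b)
--     letters = [w[0] for w in words]
--     retval = ""
--     for x in dict.fromkeys(letters):
--         n = letters.count(x)
--         if n > 1:
--             retval += x + "=" + str(n) + ", "
--     return retval + str(rhyming) + " rhyming words"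
-- ===== Notes on version B (the rewrite author's own statement) =====
-- stated objective: alternative
-- what changed: Replaces A's single online pass (membership-list rhyme detector and parallel seenletters/letternumber arrays updated via list.index) by staged offline passes: sort the suffixes and count adjacent equal pairs for the rhyme total, then iterate dict.fromkeys(letters) and count each distinct initial letter with a whole-list letters.count.
import Mathlib
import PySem

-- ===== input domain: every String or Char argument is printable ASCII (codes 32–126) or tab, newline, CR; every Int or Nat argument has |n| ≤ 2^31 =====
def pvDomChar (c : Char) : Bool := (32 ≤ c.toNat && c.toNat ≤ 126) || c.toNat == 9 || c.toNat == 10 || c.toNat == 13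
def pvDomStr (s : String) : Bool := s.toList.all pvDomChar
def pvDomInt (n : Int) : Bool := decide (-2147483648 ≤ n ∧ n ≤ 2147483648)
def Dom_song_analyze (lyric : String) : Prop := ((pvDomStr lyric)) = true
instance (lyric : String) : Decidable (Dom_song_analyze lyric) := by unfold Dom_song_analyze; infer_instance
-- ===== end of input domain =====

-- B replaces A's single online pass (membership-list rhyme counter, parallel seenletters/letternumber
-- arrays) by staged offline passes: sort the suffixes and count adjacent equal pairs, then for each
-- first-occurrence-distinct initial letter count its occurrences with a whole-list count.

-- ===== PORT A =====
-- the piece "x=<n>, " emitted for a repeated initial letter (both Pythons spell it x+"="+str(n)+", ")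
def pvPiece (p : Char × Int) : String :=
  String.ofList [p.1] ++ "=" ++ PySem.Int.toStr p.2 ++ ", "

def song_analyze (lyric : String) : String :=
  let words := ((PySem.Str.split? lyric " ").getD []).map String.toList
  let st := words.foldl
    (fun (st : (List (List Char) × Int) × (List Char × List Int)) word =>
      let rhy :=
        if 3 ≤ word.length then
          let suf := PySem.List.slice word (some ((word.length : Int) - 3)) (some (word.length : Int))
          if suf ∈ st.1.1 then (st.1.1, st.1.2 + 1) else (st.1.1 ++ [suf], st.1.2)
        else st.1
      let c := (PySem.List.pyGet? word 0).getD ' '   -- word[0]; Pre_ excludes empty words (IndexError)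
      let lt :=
        if c ∈ st.2.1 then
          (st.2.1, PySem.List.pySetD st.2.2 (((PySem.List.index? st.2.1 c).getD 0 : Nat) : Int)
            (PySem.List.pyGetD st.2.2 (((PySem.List.index? st.2.1 c).getD 0 : Nat) : Int) 0 + 1))
        else (st.2.1 ++ [c], st.2.2 ++ [(1 : Int)])
      (rhy, lt))
    (([], 0), ([], []))
  let retval := (PySem.List.enumerate st.2.1 0).foldl
    (fun retval p =>
      if 1 < PySem.List.pyGetD st.2.2 p.1 0 then
        retval ++ pvPiece (p.2, PySem.List.pyGetD st.2.2 p.1 0)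
      else retval) ""
  retval ++ PySem.Int.toStr st.1.2 ++ " rhyming words"

-- ===== PORT B =====
def song_analyze_alt (lyric : String) : String :=
  let words := ((PySem.Str.split? lyric " ").getD []).map String.toList
  let sufs := (words.filter (fun w => 3 ≤ w.length)).map
    (fun w => PySem.List.slice w (some (-3)) none)
  let ss := PySem.List.sorted sufs (fun x => x) false
  let rhyming : Int := (ss.zip (PySem.List.slice ss (some 1) none)).foldl
    (fun n p => if p.1 = p.2 then n + 1 else n) 0
  let letters := words.map (fun w => (PySem.List.pyGet? w 0).getD ' ')   -- w[0]; Pre_ excludes empty words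
  let retval := (PySem.List.dedup letters).foldl
    (fun r x =>
      if 1 < (letters.count x : Int) then r ++ pvPiece (x, (letters.count x : Int)) else r) ""
  retval ++ PySem.Int.toStr rhyming ++ " rhyming words"

-- ===== PRECONDITION & SPEC =====
-- Pre_ excludes exactly the lyrics whose split contains an empty word (empty lyric, leading/
-- trailing or doubled spaces): there Python's word[0] raises IndexError in A (and in B alike).
def Pre_song_analyze (lyric : String) : Prop :=
  ∀ w ∈ (PySem.Str.split? lyric " ").getD [], w ≠ ""
instance (lyric : String) : Decidable (Pre_song_analyze lyric) := by
  unfold Pre_song_analyze; infer_instance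
def pvWitness_song_analyze : String := "abc dog fog abc fig"
def Spec_song_analyze (lyric : String) (out : String) : Prop := out = song_analyze_alt lyric
instance (lyric : String) (out : String) : Decidable (Spec_song_analyze lyric out) := by
  unfold Spec_song_analyze; infer_instance

-- ===== CLAIM (what is proved, stated in full; the proofs are below) =====
def Claim_equal_song_analyze : Prop :=
  ∀ (lyric : String), Dom_song_analyze lyric → Pre_song_analyze lyric →
    Spec_song_analyze lyric (song_analyze lyric)

-- ===== LEMMAS AND PROOFS =====

-- a fold whose step acts componentwise splits into two folds
theorem pv_foldl_prod {α β γ : Type} (f : α → γ → α) (g : β → γ → β) :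
    ∀ (l : List γ) (a : α) (b : β),
      l.foldl (fun p x => (f p.1 x, g p.2 x)) (a, b) = (l.foldl f a, l.foldl g b) := by
  intro l
  induction l with
  | nil => intro a b; rfl
  | cons x xs ih => intro a b; simpa using ih (f a x) (g b x)

-- a fold consuming f x at each step is a fold over the mapped list
theorem pv_foldl_comp {α β γ : Type} (f : γ → β) (g : α → β → α) :
    ∀ (l : List γ) (i : α),
      l.foldl (fun a x => g a (f x)) i = (l.map f).foldl g i := by
  intro l
  induction l with
  | nil => intro i; rfl
  | cons x xs ih => intro i; simpa using ih (g i (f x))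

-- A's rhyme fold over the words equals the same fold over the extracted suffix list
theorem pv_rhyme_to_sufs :
    ∀ (ws : List (List Char)) (st : List (List Char) × Int),
      ws.foldl
        (fun st w =>
          if 3 ≤ w.length then
            if PySem.List.slice w (some ((w.length : Int) - 3)) (some (w.length : Int)) ∈ st.1
            then (st.1, st.2 + 1)
            else (st.1 ++ [PySem.List.slice w (some ((w.length : Int) - 3)) (some (w.length : Int))], st.2)
          else st) st
      = ((ws.filter (fun w => 3 ≤ w.length)).map
            (fun w => PySem.List.slice w (some ((w.length : Int) - 3)) (some (w.length : Int)))).foldl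
          (fun st s => if s ∈ st.1 then (st.1, st.2 + 1) else (st.1 ++ [s], st.2)) st := by
  intro ws
  induction ws with
  | nil => intro st; rfl
  | cons w ws ih =>
      intro st
      by_cases h : 3 ≤ w.length
      · simp [h, ih]
      · simp [h, ih]

-- A's seen-suffix list is set(sufs) and its repeat counter is len(sufs) - len(set(sufs))
theorem pv_rhyme_closed (sufs : List (List Char)) :
    sufs.foldl (fun (st : List (List Char) × Int) s =>
        if s ∈ st.1 then (st.1, st.2 + 1) else (st.1 ++ [s], st.2)) ([], 0)
      = (PySem.Set.ofList sufs,
         (sufs.length : Int) - ((PySem.Set.ofList sufs).length : Int)) := by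
  induction sufs using List.reverseRecOn with
  | nil => rfl
  | append_singleton xs x ih =>
      rw [List.foldl_append, ih, PySem.Set.ofList_append_singleton]
      by_cases h : x ∈ PySem.Set.ofList xs
      · rw [PySem.Set.add_of_mem h]
        simp only [List.foldl_cons, List.foldl_nil, if_pos h]
        refine Prod.ext rfl ?_
        simp only [List.length_append, List.length_cons, List.length_nil]
        omega
      · rw [PySem.Set.add_of_not_mem h]
        simp only [List.foldl_cons, List.foldl_nil, if_neg h]
        refine Prod.ext rfl ?_
        simp only [List.length_append, List.length_cons, List.length_nil]
        omega

-- the two slice spellings word[len-3:len] and word[-3:] agree for words of length ≥ 3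
theorem pv_suffix_eq (w : List Char) (h : 3 ≤ w.length) :
    PySem.List.slice w (some ((w.length : Int) - 3)) (some (w.length : Int))
      = PySem.List.slice w (some (-3)) none := by
  have h1 : ((w.length : Int) - 3) = ((w.length - 3 : Nat) : Int) := by omega
  have h2 : (-3 : Int) = -((3 : Nat) : Int) := by norm_num
  rw [h1, PySem.List.slice_natCast, h2, PySem.List.slice_from_neg_natCast w 3 (by omega)]
  apply List.take_of_length_le
  simp

-- sorted with identity key is Pairwise (≤) (bridges the default LT/DecidableLT instances on
-- List Char to the LinearOrder ones sorted_pairwise is stated with; they are propositionally equal)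
theorem pv_sorted_pairwise (l : List (List Char)) :
    (PySem.List.sorted l (fun x => x) false).Pairwise (fun a b => a ≤ b) := by
  have hinst : (fun (a b : List Char) => a.decidableLT b)
      = (LinearOrder.toDecidableLT (α := List Char)) := Subsingleton.elim _ _
  have h := PySem.List.sorted_pairwise (κ := List Char) l (fun x => x)
  rw [show (PySem.List.sorted l (fun x => x) false)
      = @PySem.List.sorted (List Char) (List Char) List.instLinearOrder.toLT
          LinearOrder.toDecidableLT l (fun x => x) false from by rw [← hinst]]
  exact h

-- in a ≤-sorted list, adjacent equal pairs count = length - number of distinct elements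
theorem pv_adj_nat : ∀ (l : List (List Char)), l.Pairwise (fun a b => a ≤ b) →
    (l.zip l.tail).countP (fun p => p.1 == p.2) + l.toFinset.card = l.length := by
  intro l
  induction l with
  | nil => intro _; rfl
  | cons a t ih =>
    intro hp
    cases t with
    | nil => simp
    | cons b u =>
      have hpt := hp.of_cons
      have ht := ih hpt
      have hmem : a ∈ b :: u ↔ a = b := by
        constructor
        · intro hm
          rcases List.mem_cons.mp hm with h | h
          · exact h
          · have h1 : a ≤ b := (List.pairwise_cons.mp hp).1 b (by simp)
            have h2 : b ≤ a := (List.pairwise_cons.mp hpt).1 a h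
            exact le_antisymm h1 h2
        · intro h; simp [h]
      simp only [List.tail_cons, List.zip_cons_cons, List.countP_cons]
      by_cases hab : a = b
      · have : a ∈ (b :: u).toFinset := by simp [hab]
        rw [List.toFinset_cons, Finset.insert_eq_self.mpr this]
        simp only [List.tail_cons] at ht
        simp only [hab, beq_self_eq_true, if_pos]
        simp only [List.length_cons] at *
        omega
      · have : a ∉ (b :: u).toFinset := by simp only [List.mem_toFinset]; rw [hmem]; exact hab
        rw [List.toFinset_cons, Finset.card_insert_of_notMem this]
        simp only [List.tail_cons] at ht
        have hb : (a == b) = false := beq_false_of_ne hab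
        simp only [hb, Bool.false_eq_true, if_false, List.length_cons] at *
        omega

-- set(xs) has as many elements as xs has distinct ones
theorem pv_set_len_eq_card (l : List (List Char)) :
    (PySem.Set.ofList l).length = l.toFinset.card := by
  rw [← List.toFinset_card_of_nodup (PySem.Set.nodup_ofList l)]
  congr 1
  apply Finset.ext
  intro x
  simp [List.mem_toFinset, PySem.Set.mem_ofList]

-- B's sort-then-adjacent-scan computes len(sufs) - len(set(sufs))
theorem pv_rhyme_sorted (sufs : List (List Char)) :
    ((PySem.List.sorted sufs (fun x => x) false).zip
        (PySem.List.slice (PySem.List.sorted sufs (fun x => x) false) (some 1) none)).foldl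
      (fun (n : Int) p => if p.1 = p.2 then n + 1 else n) 0
    = (sufs.length : Int) - ((PySem.Set.ofList sufs).length : Int) := by
  rw [PySem.List.slice_from_one]
  set ss := PySem.List.sorted sufs (fun x => x) false with hss
  rw [PySem.List.foldl_ite_add_one]
  have hperm : ss.Perm sufs := PySem.List.sorted_perm sufs _ false
  have hadj := pv_adj_nat ss (pv_sorted_pairwise sufs)
  have hcp : (ss.zip ss.tail).countP (fun p => decide (p.1 = p.2))
      = (ss.zip ss.tail).countP (fun p => p.1 == p.2) := by
    apply List.countP_congr
    intro p _
    simp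
  have hlen : ss.length = sufs.length := hperm.length_eq
  have hfin : ss.toFinset = sufs.toFinset := List.toFinset_eq_of_perm _ _ hperm
  rw [hcp] at *
  rw [pv_set_len_eq_card, ← hfin, ← hlen]
  omega

-- A's letter fold: seenletters is set(letters) and letternumber its parallel counts
theorem pv_letters_closed (ls : List Char) :
    ls.foldl (fun (st : List Char × List Int) c =>
        if c ∈ st.1 then
          (st.1, PySem.List.pySetD st.2 (((PySem.List.index? st.1 c).getD 0 : Nat) : Int)
            (PySem.List.pyGetD st.2 (((PySem.List.index? st.1 c).getD 0 : Nat) : Int) 0 + 1))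
        else (st.1 ++ [c], st.2 ++ [(1 : Int)])) ([], [])
      = (PySem.Set.ofList ls, (PySem.Set.ofList ls).map (fun c => (ls.count c : Int))) := by
  induction ls using List.reverseRecOn with
  | nil => rfl
  | append_singleton xs x ih =>
      rw [List.foldl_append, ih, PySem.Set.ofList_append_singleton]
      have hnd : (PySem.Set.ofList xs).Nodup := PySem.Set.nodup_ofList xs
      by_cases h : x ∈ PySem.Set.ofList xs
      · rw [PySem.Set.add_of_mem h]
        simp only [List.foldl_cons, List.foldl_nil, if_pos h]
        refine Prod.ext rfl ?_
        obtain ⟨k, hk⟩ : ∃ k, PySem.List.index? (PySem.Set.ofList xs) x = some k := by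
          cases hx : PySem.List.index? (PySem.Set.ofList xs) x with
          | none =>
              exact absurd ((PySem.List.index?_eq_none_iff _ _).mp hx) (by simpa using h)
          | some k => exact ⟨k, rfl⟩
        obtain ⟨hklt, hkx, _⟩ := PySem.List.getElem_of_index?_eq_some hk
        rw [hk]
        simp only [Option.getD_some, PySem.List.pySetD_natCast, PySem.List.pyGetD_natCast]
        have hxxs : x ∈ xs := (PySem.Set.mem_ofList _ _).mp h
        have hgd : ((PySem.Set.ofList xs).map (fun c => (xs.count c : Int))).getD k 0
            = (xs.count x : Int) := by
          rw [List.getD_eq_getElem _ _ (by simpa using hklt)]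
          simp [hkx]
        rw [hgd]
        apply List.ext_getElem
        · simp
        · intro j hj₁ hj₂
          simp only [List.getElem_set, List.getElem_map]
          by_cases hjk : k = j
          · subst hjk
            rw [if_pos rfl]
            have hx : (PySem.Set.ofList xs)[k] = x := hkx
            rw [hx]
            have hcnt : (xs ++ [x]).count x = xs.count x + 1 := by
              simp [List.count_append]
            rw [hcnt]
            push_cast
            ring
          · rw [if_neg hjk]
            have hjS : j < (PySem.Set.ofList xs).length := by simpa using hj₂
            have hne : ¬ x = (PySem.Set.ofList xs)[j]'hjS := by
              intro hEq
              exact hjk (hnd.getElem_inj_iff.mp (hkx.trans hEq))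
            simp [List.count_append, hne]
      · rw [PySem.Set.add_of_not_mem h]
        simp only [List.foldl_cons, List.foldl_nil, if_neg h]
        refine Prod.ext rfl ?_
        have hxxs : x ∉ xs := fun hx => h ((PySem.Set.mem_ofList _ _).mpr hx)
        have h1 : List.map (fun c => ((xs ++ [x]).count c : Int)) (PySem.Set.ofList xs)
            = List.map (fun c => (xs.count c : Int)) (PySem.Set.ofList xs) := by
          apply List.map_congr_left
          intro c hc
          have hcx : ¬ x = c := fun hEq => h (hEq ▸ hc)
          simp [List.count_append, hcx]
        have h2 : List.map (fun c => ((xs ++ [x]).count c : Int)) [x] = [(1 : Int)] := by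
          simp [List.count_append, List.count_eq_zero.mpr hxxs]
        rw [List.map_append, h1, h2]

-- "".join splits off its head
theorem pv_join_empty_cons (a : String) (l : List String) :
    PySem.Str.join "" (a :: l) = a ++ PySem.Str.join "" l := by
  apply String.ext
  cases l with
  | nil =>
      simp [PySem.Str.toList_join, PySem.Chars.join_singleton, PySem.Chars.join_nil]
  | cons b l =>
      simp [PySem.Str.toList_join, PySem.Chars.join_cons_cons]

-- B's retval loop (over the distinct letters, counting with f) is "".join of the filtered pieces
theorem pv_pieces_fold (f : Char → Int) :
    ∀ (S : List Char) (acc : String),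
      S.foldl (fun r x => if 1 < f x then r ++ pvPiece (x, f x) else r) acc
      = acc ++ PySem.Str.join ""
          (((S.map (fun c => (c, f c))).filter (fun p => 1 < p.2)).map pvPiece) := by
  intro S
  induction S with
  | nil =>
      intro acc
      simp only [List.foldl_nil, List.map_nil, List.filter_nil]
      apply String.ext
      simp [PySem.Str.toList_join, PySem.Chars.join_nil, String.toList_append]
  | cons x S ih =>
      intro acc
      simp only [List.foldl_cons, List.map_cons, List.filter_cons, decide_eq_true_eq]
      by_cases hfx : 1 < f x
      · simp only [if_pos hfx]
        rw [ih, List.map_cons, pv_join_empty_cons, String.append_assoc]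
      · simp only [if_neg hfx]
        exact ih acc

-- A's output loop over enumerate(seenletters) is "".join of the filtered pieces
theorem pv_out_go (f : Char → Int) (full : List Char) :
    ∀ (S pre : List Char) (acc : String), full = pre ++ S →
      (PySem.List.enumerate S (pre.length : Int)).foldl
        (fun r p =>
          if 1 < PySem.List.pyGetD (full.map f) p.1 0 then
            r ++ pvPiece (p.2, PySem.List.pyGetD (full.map f) p.1 0)
          else r) acc
      = acc ++ PySem.Str.join ""
          (((S.map (fun c => (c, f c))).filter (fun p => 1 < p.2)).map pvPiece) := by
  intro S
  induction S with
  | nil =>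
      intro pre acc _
      simp only [PySem.List.enumerate_nil, List.foldl_nil, List.map_nil, List.filter_nil]
      apply String.ext
      simp [PySem.Str.toList_join, PySem.Chars.join_nil, String.toList_append]
  | cons x S ih =>
      intro pre acc hfull
      rw [PySem.List.enumerate_cons]
      have hget : PySem.List.pyGetD (full.map f) ((pre.length : Nat) : Int) 0 = f x := by
        rw [PySem.List.pyGetD_natCast, hfull, List.map_append]
        rw [List.getD_eq_getElem _ _ (by simp)]
        rw [List.getElem_append_right (by simp)]
        simp
      have hcast : ((pre.length : Int) + 1) = (((pre ++ [x]).length : Nat) : Int) := by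
        simp
      simp only [List.foldl_cons, hget, hcast]
      rw [ih (pre ++ [x]) _ (by simp [hfull])]
      by_cases hfx : 1 < f x
      · simp only [if_pos hfx, List.map_cons, List.filter_cons, decide_eq_true_eq]
        rw [pv_join_empty_cons, String.append_assoc]
      · simp only [if_neg hfx, List.map_cons, List.filter_cons, decide_eq_true_eq]

-- "" ++ s = s for strings
theorem pv_empty_append (s : String) : "" ++ s = s := by
  apply String.ext
  simp

-- ===== VERDICT (by name: the statement is the Claim_ definition above) =====
theorem song_analyze_spec : Claim_equal_song_analyze := by
  intro lyric _ _
  show song_analyze lyric = song_analyze_alt lyric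
  simp only [song_analyze, song_analyze_alt]
  rw [pv_foldl_prod
    (fun (a : List (List Char) × Int) (word : List Char) =>
      if 3 ≤ word.length then
        if PySem.List.slice word (some ((word.length : Int) - 3)) (some (word.length : Int)) ∈ a.1
        then (a.1, a.2 + 1)
        else (a.1 ++ [PySem.List.slice word (some ((word.length : Int) - 3)) (some (word.length : Int))], a.2)
      else a)
    (fun (b : List Char × List Int) (word : List Char) =>
      if (PySem.List.pyGet? word 0).getD ' ' ∈ b.1 then
        (b.1, PySem.List.pySetD b.2
          (((PySem.List.index? b.1 ((PySem.List.pyGet? word 0).getD ' ')).getD 0 : Nat) : Int)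
          (PySem.List.pyGetD b.2
            (((PySem.List.index? b.1 ((PySem.List.pyGet? word 0).getD ' ')).getD 0 : Nat) : Int) 0 + 1))
      else (b.1 ++ [(PySem.List.pyGet? word 0).getD ' '], b.2 ++ [(1 : Int)]))]
  rw [pv_rhyme_to_sufs]
  have hmap : ∀ (ws : List (List Char)),
      (ws.filter (fun w => 3 ≤ w.length)).map
          (fun w => PySem.List.slice w (some ((w.length : Int) - 3)) (some (w.length : Int)))
        = (ws.filter (fun w => 3 ≤ w.length)).map
          (fun w => PySem.List.slice w (some (-3)) none) := by
    intro ws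
    apply List.map_congr_left
    intro w hw
    exact pv_suffix_eq w (by simpa using (List.mem_filter.mp hw).2)
  rw [hmap, pv_rhyme_closed]
  rw [pv_foldl_comp (fun (word : List Char) => (PySem.List.pyGet? word 0).getD ' ')
    (fun (b : List Char × List Int) c =>
      if c ∈ b.1 then
        (b.1, PySem.List.pySetD b.2 (((PySem.List.index? b.1 c).getD 0 : Nat) : Int)
          (PySem.List.pyGetD b.2 (((PySem.List.index? b.1 c).getD 0 : Nat) : Int) 0 + 1))
      else (b.1 ++ [c], b.2 ++ [(1 : Int)]))]
  rw [pv_letters_closed]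
  rw [pv_rhyme_sorted, PySem.List.dedup_eq_ofList, pv_pieces_fold]
  have hout := pv_out_go
    (fun c => ((((PySem.Str.split? lyric " ").getD []).map String.toList).map
        (fun word => (PySem.List.pyGet? word 0).getD ' ')).count c : Char → Int)
    (PySem.Set.ofList (((PySem.Str.split? lyric " ").getD []).map String.toList |>.map
        (fun word => (PySem.List.pyGet? word 0).getD ' ')))
    (PySem.Set.ofList (((PySem.Str.split? lyric " ").getD []).map String.toList |>.map
        (fun word => (PySem.List.pyGet? word 0).getD ' ')))
    [] "" rfl
  simp only [List.length_nil, Nat.cast_zero] at hout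
  rw [hout, pv_empty_append]
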